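-- pv_equiv track=rewrite | github.com/fernando-elias/zombiedice | Zombidice - PTBR.py | dados_disponiveis
-- ===== SOURCE A (Python) =====
-- def dados_disponiveis(x: list):
--     """
--     Calcula o número de dados disponivéis em cada jogada.
--
--     :param x: Lista com os dados disponíveis
--     :return: Retorna respectivamente o número de dados verdes, amarelos e vermelhos neste momento.
--     """
--     vd = 0
--     a = 0
--     ve = 0
--     for z in range(len(x)):
--         if x[z] == dadoVerde:
--             vd += 1
--         elif x[z] == dadoAmarelo:
--             a += 1
--         else:
--             ve += 1
--     return vd, a, ve
--
-- dadoVerde = 'CPCTPC'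
--
-- dadoAmarelo = 'TPCTPC'
-- ===== SOURCE B (Python) =====
-- dadoVerde = 'CPCTPC'
-- dadoAmarelo = 'TPCTPC'
--
-- def dados_disponiveis(x: list):
--     vd = x.count(dadoVerde)
--     a = x.count(dadoAmarelo)
--     return vd, a, len(x) - vd - a
-- ===== Notes on version B (the rewrite author's own statement) =====
-- stated objective: simpler
-- what changed: Replaces the index loop that classifies each element with three counters by two list.count scans plus arithmetic (red = len - green - yellow, matching the catch-all else).
import Mathlib
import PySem

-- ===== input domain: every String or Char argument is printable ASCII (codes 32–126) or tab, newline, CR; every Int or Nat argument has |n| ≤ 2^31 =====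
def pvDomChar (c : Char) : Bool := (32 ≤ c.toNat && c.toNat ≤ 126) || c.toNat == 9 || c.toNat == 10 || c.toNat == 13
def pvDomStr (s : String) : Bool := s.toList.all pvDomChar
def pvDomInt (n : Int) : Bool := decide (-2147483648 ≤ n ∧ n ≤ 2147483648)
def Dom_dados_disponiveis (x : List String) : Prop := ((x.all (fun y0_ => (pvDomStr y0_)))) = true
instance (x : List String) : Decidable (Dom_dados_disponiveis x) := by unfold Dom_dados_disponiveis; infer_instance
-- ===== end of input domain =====

-- B counts greens and yellows with two list.count scans and derives red by arithmetic (simpler than A's classifying index loop).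


-- ===== PORT A =====
def dadoVerde : String := "CPCTPC"
def dadoAmarelo : String := "TPCTPC"

-- literal transliteration: for z in range(len(x)): classify x[z] into one of three counters
def dados_disponiveis (x : List String) : Int × Int × Int :=
  (PySem.List.pyRange 0 (x.length : Int) 1).foldl
    (fun (s : Int × Int × Int) z =>
      let v := PySem.List.pyGetD x z ""
      if v == dadoVerde then (s.1 + 1, s.2.1, s.2.2)
      else if v == dadoAmarelo then (s.1, s.2.1 + 1, s.2.2)
      else (s.1, s.2.1, s.2.2 + 1)) (0, 0, 0)

-- ===== PORT B =====
def dados_disponiveis_alt (x : List String) : Int × Int × Int :=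
  let vd : Int := PySem.List.count x dadoVerde
  let a : Int := PySem.List.count x dadoAmarelo
  (vd, a, (x.length : Int) - vd - a)

-- ===== PRECONDITION & SPEC =====
def Spec_dados_disponiveis (x : List String) (out : Int × Int × Int) : Prop := out = dados_disponiveis_alt x
instance (x : List String) (out : Int × Int × Int) : Decidable (Spec_dados_disponiveis x out) := by unfold Spec_dados_disponiveis; infer_instance

-- ===== CLAIM (what is proved, stated in full; the proofs are below) =====
def Claim_equal_dados_disponiveis : Prop := ∀ (x : List String), Dom_dados_disponiveis x → Spec_dados_disponiveis x (dados_disponiveis x)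

-- ===== LEMMAS AND PROOFS =====
theorem dados_foldl (x : List String) (s : Int × Int × Int) :
    x.foldl
      (fun (s : Int × Int × Int) v =>
        if v == dadoVerde then (s.1 + 1, s.2.1, s.2.2)
        else if v == dadoAmarelo then (s.1, s.2.1 + 1, s.2.2)
        else (s.1, s.2.1, s.2.2 + 1)) s
    = (s.1 + x.count dadoVerde, s.2.1 + x.count dadoAmarelo,
       s.2.2 + ((x.length : Int) - x.count dadoVerde - x.count dadoAmarelo)) := by
  induction x generalizing s with
  | nil => simp
  | cons h t ih =>
    simp only [List.foldl_cons, List.count_cons, List.length_cons]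
    by_cases hv : h == dadoVerde
    · have ha : ¬ (h == dadoAmarelo) := by simp_all [dadoVerde, dadoAmarelo]
      simp only [hv, ha, if_pos, ih, Prod.ext_iff]
      push_cast
      refine ⟨by ring, by ring, by ring⟩
    · by_cases ha : h == dadoAmarelo
      · simp only [hv, ha, if_pos, ih, Prod.ext_iff]
        push_cast
        refine ⟨by ring, by ring, by ring⟩
      · simp only [hv, ha, ih, Prod.ext_iff]
        push_cast
        refine ⟨by ring, by ring, by ring⟩

-- ===== VERDICT (by name: the statement is the Claim_ definition above) =====
theorem dados_disponiveis_spec : Claim_equal_dados_disponiveis := by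
  intro x _
  unfold Spec_dados_disponiveis dados_disponiveis dados_disponiveis_alt
  rw [PySem.List.foldl_pyRange_zero_pyGetD' x ""
    (fun (s : Int × Int × Int) v =>
      if v == dadoVerde then (s.1 + 1, s.2.1, s.2.2)
      else if v == dadoAmarelo then (s.1, s.2.1 + 1, s.2.2)
      else (s.1, s.2.1, s.2.2 + 1)) (0, 0, 0)]
  rw [dados_foldl]
  simp [PySem.List.count]
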